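-- pv_equiv track=rewrite | github.com/olsen121/CPSC370_AES | aes.py | ends
-- ===== SOURCE A (Python) =====
-- def ends(state):
--     flag = False
--     ret = False
--     for i in range(4):
--         for j in range(4):
--             if (state[i][j] == 0 and flag):
--                 # r = (i-1) % 4
--                 # c = (j-1) % 4
--                 ret = True
--             elif (state[i][j] == 0):
--                 flag = True
--             elif (flag):
--                 flag = False
--                 ret = False
--
--     return ret
-- ===== SOURCE B (Python) =====
-- def ends(state):
--     # Read all 16 cells in row-major order (same accesses as A), then the
--     # result depends only on the last two cells being zero.
--     cells = [state[i][j] for i in range(4) for j in range(4)]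
--     return cells[-2] == 0 and cells[-1] == 0
-- ===== Notes on version B (the rewrite author's own statement) =====
-- stated objective: simpler
-- what changed: Replaced A's flag/ret two-variable state machine over all 16 cells with a direct closed-form test: flatten the grid row-major and check that the last two cells are zero, which is exactly when A's state machine ends with ret=True.
import Mathlib
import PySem

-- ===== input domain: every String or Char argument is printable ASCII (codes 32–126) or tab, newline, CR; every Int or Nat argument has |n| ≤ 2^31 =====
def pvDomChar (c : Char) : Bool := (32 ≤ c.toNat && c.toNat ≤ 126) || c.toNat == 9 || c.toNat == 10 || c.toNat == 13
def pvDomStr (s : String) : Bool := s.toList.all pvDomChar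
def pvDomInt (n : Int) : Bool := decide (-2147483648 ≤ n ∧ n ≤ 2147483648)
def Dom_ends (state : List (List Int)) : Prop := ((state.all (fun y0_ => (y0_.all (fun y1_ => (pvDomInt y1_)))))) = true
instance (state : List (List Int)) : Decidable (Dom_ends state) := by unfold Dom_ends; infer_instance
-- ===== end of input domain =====

-- B replaces A's flag/ret state machine with a closed-form test on the last two
-- cells of the row-major flattening (objective: simpler).

-- ===== PORT A =====
-- the body of A's inner loop on one cell (state (flag, ret), same branch order)
def pvStep (s : Bool × Bool) (v : Int) : Bool × Bool :=
  if v == 0 && s.1 then (s.1, true)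
  else if v == 0 then (true, s.2)
  else if s.1 then (false, false)
  else s

-- state[i][j]: under Pre_ends every access is in range, so the `.getD` defaults are never used
def ends (state : List (List Int)) : Bool :=
  ((PySem.List.pyRange 0 4 1).foldl (fun s i =>
     (PySem.List.pyRange 0 4 1).foldl (fun s j =>
        pvStep s ((PySem.List.pyGet? ((PySem.List.pyGet? state i).getD []) j).getD 0)) s)
   (false, false)).2

-- ===== PORT B =====
def ends_alt (state : List (List Int)) : Bool :=
  let cells := (PySem.List.pyRange 0 4 1).flatMap (fun i =>
     (PySem.List.pyRange 0 4 1).map (fun j =>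
        (PySem.List.pyGet? ((PySem.List.pyGet? state i).getD []) j).getD 0))
  ((PySem.List.pyGet? cells (-2)).getD 0 == 0) && ((PySem.List.pyGet? cells (-1)).getD 0 == 0)

-- ===== PRECONDITION & SPEC =====
-- A raises IndexError unless the grid has at least 4 rows, the first four each of length ≥ 4
def Pre_ends (state : List (List Int)) : Prop :=
  4 ≤ state.length ∧ ∀ r ∈ state.take 4, 4 ≤ r.length
instance (state : List (List Int)) : Decidable (Pre_ends state) := by unfold Pre_ends; infer_instance

def pvWitness_ends : List (List Int) :=
  [[1, 0, 2, 3], [0, 0, 0, 5], [7, 7, 7, 7], [1, 2, 0, 0]]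

def Spec_ends (state : List (List Int)) (out : Bool) : Prop := out = ends_alt state
instance (state : List (List Int)) (out : Bool) : Decidable (Spec_ends state out) := by unfold Spec_ends; infer_instance

-- ===== CLAIM (what is proved, stated in full; the proofs are below) =====
def Claim_equal_ends : Prop := ∀ (state : List (List Int)), Dom_ends state → Pre_ends state → Spec_ends state (ends state)

-- ===== LEMMAS AND PROOFS =====

-- literal indexing into a list with at least four known head elements
theorem pvNth0 {α : Type} (d x0 x1 x2 x3 : α) (t : List α) :
    (PySem.List.pyGet? (x0::x1::x2::x3::t) (0:Int)).getD d = x0 := by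
  rw [show (0:Int) = ((0:Nat):Int) by norm_num, PySem.List.pyGet?_natCast]; simp
theorem pvNth1 {α : Type} (d x0 x1 x2 x3 : α) (t : List α) :
    (PySem.List.pyGet? (x0::x1::x2::x3::t) (1:Int)).getD d = x1 := by
  rw [show (1:Int) = ((1:Nat):Int) by norm_num, PySem.List.pyGet?_natCast]; simp
theorem pvNth2 {α : Type} (d x0 x1 x2 x3 : α) (t : List α) :
    (PySem.List.pyGet? (x0::x1::x2::x3::t) (2:Int)).getD d = x2 := by
  rw [show (2:Int) = ((2:Nat):Int) by norm_num, PySem.List.pyGet?_natCast]; simp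
theorem pvNth3 {α : Type} (d x0 x1 x2 x3 : α) (t : List α) :
    (PySem.List.pyGet? (x0::x1::x2::x3::t) (3:Int)).getD d = x3 := by
  rw [show (3:Int) = ((3:Nat):Int) by norm_num, PySem.List.pyGet?_natCast]; simp

-- pvStep preserves the invariant "ret → flag"
theorem pvStep_inv (s : Bool × Bool) (h : s.2 = true → s.1 = true) (v : Int) :
    (pvStep s v).2 = true → (pvStep s v).1 = true := by
  unfold pvStep
  split_ifs with h1 h2 h3 <;> simp_all

-- given the invariant, the last two steps alone decide the result
theorem pvStep_last2 (s : Bool × Bool) (h : s.2 = true → s.1 = true) (x y : Int) :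
    (pvStep (pvStep s x) y).2 = ((x == 0) && (y == 0)) := by
  obtain ⟨f, r⟩ := s
  unfold pvStep
  by_cases hx : x = 0 <;> by_cases hy : y = 0 <;> cases f <;> simp_all

-- ===== VERDICT (by name: the statement is the Claim_ definition above) =====
theorem ends_spec : Claim_equal_ends := by
  intro state _ hpre
  obtain ⟨hlen, hrows⟩ := hpre
  match state, hlen with
  | r0 :: r1 :: r2 :: r3 :: rest, _ =>
    have h0 := hrows r0 (by simp)
    have h1 := hrows r1 (by simp)
    have h2 := hrows r2 (by simp)
    have h3 := hrows r3 (by simp)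
    match r0, h0 with
    | a0 :: a1 :: a2 :: a3 :: t0, _ =>
    match r1, h1 with
    | b0 :: b1 :: b2 :: b3 :: t1, _ =>
    match r2, h2 with
    | c0 :: c1 :: c2 :: c3 :: t2, _ =>
    match r3, h3 with
    | d0 :: d1 :: d2 :: d3 :: t3, _ =>
      show ends _ = ends_alt _
      have hr : PySem.List.pyRange 0 4 1 = [0, 1, 2, 3] := by decide
      simp only [ends, ends_alt, hr, List.foldl, List.flatMap_cons, List.flatMap_nil,
        List.map_cons, List.map_nil, List.append_nil, List.cons_append, List.nil_append,
        pvNth0, pvNth1, pvNth2, pvNth3]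
      rw [PySem.List.pyGet?_neg_ofNat _ 2 (by norm_num) (by simp),
          PySem.List.pyGet?_neg_ofNat _ 1 (by norm_num) (by simp)]
      simp only [List.length_cons, List.length_nil]
      norm_num
      rw [pvStep_last2]
      repeat apply pvStep_inv
      simp
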